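-- pv_equiv track=rewrite | github.com/arinakonnova/optical-music-recognition | hds.py | delete_out_of_staff
-- ===== SOURCE A (Python) =====
-- def delete_out_of_staff(rectangles, staves):
--     filtered = []
--     for p in rectangles:
--         found = False
--         for staff in staves:
--             ys = sorted(staff)
--             if ys[0] - 50 < p[1] < ys[-1] + 50:
--                 found = True
--                 break
--         if found:
--             filtered.append(p)
--     return filtered
-- ===== SOURCE B (Python) =====
-- def delete_out_of_staff(rectangles, staves):
--     # Sort each staff once via min/max, merge the resulting open bands, then test each rectangle.
--     intervals = sorted(((min(s) - 50, max(s) + 50) for s in staves), key=lambda t: t[0])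
--     merged = []
--     for lo, hi in intervals:
--         if merged and lo < merged[-1][1]:
--             if hi > merged[-1][1]:
--                 merged[-1] = (merged[-1][0], hi)
--         else:
--             merged.append((lo, hi))
--     return [p for p in rectangles
--             if any(lo < p[1] < hi for lo, hi in merged)]
-- ===== Notes on version B (the rewrite author's own statement) =====
-- stated objective: alternative
-- what changed: B replaces the per-rectangle re-sorting of every staff by a one-time pass that turns each staff into an open band via min/max, sorts and merges the bands, and then tests each rectangle against the merged bands only.
-- outside the precondition, e.g. on delete_out_of_staff([(-1, 50)], [[0, 0], [49, -1], []]): A returns [(-1, 50)], B raises ValueError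
import Mathlib
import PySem

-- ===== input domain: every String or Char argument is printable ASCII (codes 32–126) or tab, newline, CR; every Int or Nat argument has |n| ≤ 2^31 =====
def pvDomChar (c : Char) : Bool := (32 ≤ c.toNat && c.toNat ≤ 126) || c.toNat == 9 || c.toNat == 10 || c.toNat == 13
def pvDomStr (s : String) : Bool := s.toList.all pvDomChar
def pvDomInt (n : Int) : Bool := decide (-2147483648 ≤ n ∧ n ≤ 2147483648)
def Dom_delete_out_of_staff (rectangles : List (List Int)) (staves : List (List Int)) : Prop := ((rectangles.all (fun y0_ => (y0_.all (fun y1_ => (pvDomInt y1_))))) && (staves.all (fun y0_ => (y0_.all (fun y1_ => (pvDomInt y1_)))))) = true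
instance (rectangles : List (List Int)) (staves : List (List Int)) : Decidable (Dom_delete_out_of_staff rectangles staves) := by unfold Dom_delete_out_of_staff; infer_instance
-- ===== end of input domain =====

-- B sorts each staff once (min/max), merges the bands, then tests rectangles against the merged bands;
-- A re-sorts every staff for every rectangle.

-- ===== PORT A =====
-- inner 'for staff in staves: … break' loop of A; ys[0]/ys[-1]/p[1] via pyGetD
-- (the default 0 is unreachable under Pre_: staves have no empty staff and rectangles have ≥ 2 entries)
def pvAInner (p : List Int) : List (List Int) → Bool
  | [] => false
  | staff :: rest =>
      let ys := PySem.List.sorted staff (fun x => x) false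
      if PySem.List.pyGetD ys 0 0 - 50 < PySem.List.pyGetD p 1 0 ∧
         PySem.List.pyGetD p 1 0 < PySem.List.pyGetD ys (-1) 0 + 50 then true
      else pvAInner p rest

def delete_out_of_staff (rectangles : List (List Int)) (staves : List (List Int)) : List (List Int) :=
  rectangles.foldl (fun filtered p => if pvAInner p staves then filtered ++ [p] else filtered) []

-- ===== PORT B =====
-- one merge step of B's loop over the sorted bands (merged[-1] via getLast?/dropLast)
def pvMergeStep (merged : List (Int × Int)) (q : Int × Int) : List (Int × Int) :=
  match merged.getLast? with
  | some last =>
      if q.1 < last.2 then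
        (if last.2 < q.2 then merged.dropLast ++ [(last.1, q.2)] else merged)
      else merged ++ [q]
  | none => merged ++ [q]

def delete_out_of_staff_alt (rectangles : List (List Int)) (staves : List (List Int)) : List (List Int) :=
  let intervals := PySem.List.sorted
    (staves.map (fun s => (((PySem.List.min? s (fun x => x)).getD 0) - 50,
                           ((PySem.List.max? s (fun x => x)).getD 0) + 50)))
    (fun t => t.1) false
  let merged := intervals.foldl pvMergeStep []
  rectangles.filter (fun p =>
    merged.any (fun q => decide (q.1 < PySem.List.pyGetD p 1 0) &&
                         decide (PySem.List.pyGetD p 1 0 < q.2)))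

-- ===== PRECONDITION & SPEC =====
-- Pre_ excludes inputs with an empty staff and, when staves is nonempty, rectangles with fewer than two
-- entries: Python A raises IndexError there (except that A's break can skip an empty staff when every
-- rectangle already matched an earlier staff, where A still returns), and B, which takes min/max of every
-- staff up front, raises ValueError on any empty staff.
def Pre_delete_out_of_staff (rectangles : List (List Int)) (staves : List (List Int)) : Prop :=
  (∀ s ∈ staves, s ≠ []) ∧ (staves = [] ∨ ∀ p ∈ rectangles, 2 ≤ p.length)
instance (rectangles : List (List Int)) (staves : List (List Int)) : Decidable (Pre_delete_out_of_staff rectangles staves) := by unfold Pre_delete_out_of_staff; infer_instance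
def pvWitness_delete_out_of_staff : List (List Int) × List (List Int) :=
  ([[0, 10, 20], [0, 300, 20]], [[30, 60], [400, 420]])

def Spec_delete_out_of_staff (rectangles : List (List Int)) (staves : List (List Int)) (out : List (List Int)) : Prop := out = delete_out_of_staff_alt rectangles staves
instance (rectangles : List (List Int)) (staves : List (List Int)) (out : List (List Int)) : Decidable (Spec_delete_out_of_staff rectangles staves out) := by unfold Spec_delete_out_of_staff; infer_instance

-- ===== CLAIM (what is proved, stated in full; the proofs are below) =====
def Claim_equal_delete_out_of_staff : Prop := ∀ (rectangles : List (List Int)) (staves : List (List Int)), Dom_delete_out_of_staff rectangles staves → Pre_delete_out_of_staff rectangles staves → Spec_delete_out_of_staff rectangles staves (delete_out_of_staff rectangles staves)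

-- ===== LEMMAS AND PROOFS =====

-- band-membership test: does y lie strictly inside some open interval of l
def pvHit (y : Int) (l : List (Int × Int)) : Bool :=
  l.any (fun q => decide (q.1 < y) && decide (y < q.2))

-- A's inner break-loop is an 'any' over staves
theorem pvAInner_eq_any (p : List Int) (staves : List (List Int)) :
    pvAInner p staves = staves.any (fun s =>
      decide (PySem.List.pyGetD (PySem.List.sorted s (fun x => x) false) 0 0 - 50 < PySem.List.pyGetD p 1 0) &&
      decide (PySem.List.pyGetD p 1 0 < PySem.List.pyGetD (PySem.List.sorted s (fun x => x) false) (-1) 0 + 50)) := by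
  induction staves with
  | nil => rfl
  | cons s rest ih =>
      simp only [pvAInner, List.any_cons, ← ih]
      by_cases h : PySem.List.pyGetD (PySem.List.sorted s (fun x => x) false) 0 0 - 50 < PySem.List.pyGetD p 1 0 ∧
          PySem.List.pyGetD p 1 0 < PySem.List.pyGetD (PySem.List.sorted s (fun x => x) false) (-1) 0 + 50
      · simp [h.1, h.2]
      · rw [if_neg h]
        rcases not_and_or.mp h with h1 | h1 <;> simp [h1]

-- head of sorted(s) is min(s)
theorem pvSortedHead (s : List Int) (hs : s ≠ []) :
    PySem.List.pyGetD (PySem.List.sorted s (fun x => x) false) 0 0 =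
      (PySem.List.min? s (fun x => x)).getD 0 := by
  rcases hys : PySem.List.sorted s (fun x => x) false with _ | ⟨m, t⟩
  · exact absurd ((PySem.List.sorted_eq_nil_iff s (fun x => x) false).mp hys) hs
  rcases hmn : PySem.List.min? s (fun x => x) with _ | mn
  · exact absurd ((PySem.List.min?_eq_none_iff s (fun x => x)).mp hmn) hs
  have hm : m ∈ s := (PySem.List.mem_sorted s (fun x => x) false m).mp (by rw [hys]; exact List.mem_cons_self ..)
  have h1 : m ≤ mn := PySem.List.key_head_sorted_le s (fun x => x) hys mn (PySem.List.min?_mem hmn)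
  have h2 : mn ≤ m := PySem.List.min?_isMin hmn m hm
  simp [PySem.List.pyGetD_zero_cons, le_antisymm h1 h2]

-- last of sorted(s) is max(s)
theorem pvSortedLast (s : List Int) (hs : s ≠ []) :
    PySem.List.pyGetD (PySem.List.sorted s (fun x => x) false) (-1) 0 =
      (PySem.List.max? s (fun x => x)).getD 0 := by
  have hys : PySem.List.sorted s (fun x => x) false ≠ [] := by
    simpa [PySem.List.sorted_eq_nil_iff] using hs
  rcases hmx : PySem.List.max? s (fun x => x) with _ | mx
  · exact absurd ((PySem.List.max?_eq_none_iff s (fun x => x)).mp hmx) hs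
  rw [PySem.List.pyGetD_neg_one _ 0 hys]
  have hlast_mem : (PySem.List.sorted s (fun x => x) false).getLast hys ∈ s :=
    (PySem.List.mem_sorted s (fun x => x) false _).mp (List.getLast_mem hys)
  have h1 : (PySem.List.sorted s (fun x => x) false).getLast hys ≤ mx :=
    PySem.List.max?_isMax hmx _ hlast_mem
  have hmem : mx ∈ PySem.List.sorted s (fun x => x) false :=
    (PySem.List.mem_sorted s (fun x => x) false mx).mpr (PySem.List.max?_mem hmx)
  obtain ⟨i, hi, hival⟩ := List.mem_iff_getElem.mp hmem
  have h2 : mx ≤ (PySem.List.sorted s (fun x => x) false).getLast hys := by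
    rw [List.getLast_eq_getElem]
    calc mx = (PySem.List.sorted s (fun x => x) false)[i] := hival.symm
      _ ≤ _ := PySem.List.sorted_id_getElem_mono s (by omega) (by omega)
  simp [le_antisymm h1 h2]

-- one step of B's merge loop, on a state with an exposed last interval
theorem pvMergeStep_concat (init : List (Int × Int)) (clo chi : Int) (q : Int × Int) :
    pvMergeStep (init ++ [(clo, chi)]) q =
      if q.1 < chi then
        (if chi < q.2 then init ++ [(clo, q.2)] else init ++ [(clo, chi)])
      else (init ++ [(clo, chi)]) ++ [q] := by
  simp [pvMergeStep]

-- B's merge loop preserves band membership (intervals sorted by left endpoint)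
theorem pvMerge_loop (y : Int) (l : List (Int × Int)) :
    ∀ (init : List (Int × Int)) (clo chi : Int),
    l.Pairwise (fun a b => a.1 ≤ b.1) → (∀ q ∈ l, clo ≤ q.1) →
    pvHit y (l.foldl pvMergeStep (init ++ [(clo, chi)])) =
      (pvHit y init || (decide (clo < y) && decide (y < chi)) || pvHit y l) := by
  induction l with
  | nil => intro init clo chi _ _; simp [pvHit, List.any_append]
  | cons q rest ih =>
      intro init clo chi hp hge
      have hq : clo ≤ q.1 := hge q (List.mem_cons_self ..)
      have hp' := (List.pairwise_cons.mp hp).2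
      rw [List.foldl_cons, pvMergeStep_concat]
      by_cases h1 : q.1 < chi
      · rw [if_pos h1]
        by_cases h2 : chi < q.2
        · rw [if_pos h2, ih init clo q.2 hp'
            (fun r hr => le_trans hq ((List.pairwise_cons.mp hp).1 r hr))]
          rw [Bool.eq_iff_iff]
          simp only [pvHit, List.any_cons, Bool.or_eq_true, Bool.and_eq_true, decide_eq_true_eq]
          constructor
          · rintro ((h | ⟨ha, hb⟩) | h)
            · exact Or.inl (Or.inl h)
            · by_cases hy : y < chi
              · exact Or.inl (Or.inr ⟨ha, hy⟩)
              · exact Or.inr (Or.inl ⟨by omega, hb⟩)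
            · exact Or.inr (Or.inr h)
          · rintro ((h | ⟨ha, hb⟩) | (⟨ha, hb⟩ | h))
            · exact Or.inl (Or.inl h)
            · exact Or.inl (Or.inr ⟨ha, by omega⟩)
            · exact Or.inl (Or.inr ⟨by omega, hb⟩)
            · exact Or.inr h
        · rw [if_neg h2, ih init clo chi hp'
            (fun r hr => le_trans hq ((List.pairwise_cons.mp hp).1 r hr))]
          rw [Bool.eq_iff_iff]
          simp only [pvHit, List.any_cons, Bool.or_eq_true, Bool.and_eq_true, decide_eq_true_eq]
          constructor
          · rintro ((h | h) | h)
            · exact Or.inl (Or.inl h)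
            · exact Or.inl (Or.inr h)
            · exact Or.inr (Or.inr h)
          · rintro ((h | h) | (⟨ha, hb⟩ | h))
            · exact Or.inl (Or.inl h)
            · exact Or.inl (Or.inr h)
            · exact Or.inl (Or.inr ⟨by omega, by omega⟩)
            · exact Or.inr h
      · rw [if_neg h1, ih (init ++ [(clo, chi)]) q.1 q.2 hp' (List.pairwise_cons.mp hp).1]
        simp only [pvHit, List.any_append, List.any_cons]
        rw [Bool.eq_iff_iff]
        simp only [Bool.or_eq_true]
        tauto

-- B's merge preserves band membership
theorem pvMerge_hit (y : Int) (l : List (Int × Int)) (hp : l.Pairwise (fun a b => a.1 ≤ b.1)) :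
    pvHit y (l.foldl pvMergeStep []) = pvHit y l := by
  cases l with
  | nil => rfl
  | cons q rest =>
      have h0 : pvMergeStep [] q = [] ++ [(q.1, q.2)] := by simp [pvMergeStep]
      rw [List.foldl_cons, h0, pvMerge_loop y rest ([]) q.1 q.2
        (List.pairwise_cons.mp hp).2 (List.pairwise_cons.mp hp).1]
      simp [pvHit]

-- 'any' is invariant under permutation (sorting the intervals)
theorem pvHit_perm (y : Int) {l₁ l₂ : List (Int × Int)} (h : l₁.Perm l₂) :
    pvHit y l₁ = pvHit y l₂ := by
  rw [Bool.eq_iff_iff]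
  simp only [pvHit, List.any_eq_true]
  constructor <;> rintro ⟨q, hq, hh⟩
  · exact ⟨q, h.mem_iff.mp hq, hh⟩
  · exact ⟨q, h.mem_iff.mpr hq, hh⟩

-- ===== VERDICT (by name: the statement is the Claim_ definition above) =====
theorem delete_out_of_staff_spec : Claim_equal_delete_out_of_staff := by
  intro rectangles staves _ hpre
  unfold Spec_delete_out_of_staff delete_out_of_staff delete_out_of_staff_alt
  rw [PySem.List.foldl_append_if_eq_filter]
  rw [List.nil_append]
  apply List.filter_congr
  intro p _
  set intervals := PySem.List.sorted
    (staves.map (fun s => (((PySem.List.min? s (fun x => x)).getD 0) - 50,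
                           ((PySem.List.max? s (fun x => x)).getD 0) + 50)))
    (fun t => t.1) false with hint
  have hpair : intervals.Pairwise (fun a b => a.1 ≤ b.1) := PySem.List.sorted_pairwise _ _
  have hb : (intervals.foldl pvMergeStep []).any
      (fun q => decide (q.1 < PySem.List.pyGetD p 1 0) &&
                decide (PySem.List.pyGetD p 1 0 < q.2)) =
      pvHit (PySem.List.pyGetD p 1 0) (intervals.foldl pvMergeStep []) := rfl
  rw [hb, pvMerge_hit _ _ hpair,
    pvHit_perm _ (PySem.List.sorted_perm (staves.map (fun s => (((PySem.List.min? s (fun x => x)).getD 0) - 50, ((PySem.List.max? s (fun x => x)).getD 0) + 50))) (fun t => t.1) false)]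
  rw [pvAInner_eq_any]
  simp only [pvHit, List.any_map]
  apply PySem.List.any_congr_mem
  intro s hsmem
  have hs : s ≠ [] := hpre.1 s hsmem
  simp only [Function.comp]
  rw [pvSortedHead s hs, pvSortedLast s hs]
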